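-- pv_equiv track=rewrite | github.com/txt114514/fuckosu | src/Traning/Lib/get_training_data/config_loader.py | _optional_string_tuple
-- ===== SOURCE A (Python) =====
-- from typing import Any, Callable, Iterable, TypeVar
--
-- def _optional_nonempty_str(value: Any) -> str | None:
--     if not isinstance(value, str):
--         return None
--     normalized = value.strip()
--     return normalized or None
--
-- def _optional_string_tuple(value: Any) -> tuple[str, ...] | None:
--     if not isinstance(value, list):
--         return None
--
--     normalized_items: list[str] = []
--     seen_items: set[str] = set()
--     for item in value:
--         normalized = _optional_nonempty_str(item)
--         if normalized is None or normalized in seen_items: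
--             return None
--         seen_items.add(normalized)
--         normalized_items.append(normalized)
--
--     if not normalized_items:
--         return None
--     return tuple(normalized_items)
-- ===== SOURCE B (Python) =====
-- def _optional_nonempty_str(value):
--     if not isinstance(value, str):
--         return None
--     normalized = value.strip()
--     return normalized or None
--
-- def _optional_string_tuple(value):
--     if not isinstance(value, list) or not all(isinstance(x, str) for x in value):
--         return None
--     normalized = [x.strip() for x in value]
--     if not normalized or "" in normalized:
--         return None
--     if len(set(normalized)) != len(normalized):
--         return None
--     return tuple(normalized)
-- ===== Notes on version B (the rewrite author's own statement) =====
-- stated objective: simpler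
-- what changed: A's single incremental pass that grows the result and a running 'seen' set with mid-loop short-circuit is replaced by three bulk phases: strip everything, then one emptiness/empty-string check, then one whole-list duplicate check via len(set(...)).
import Mathlib
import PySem

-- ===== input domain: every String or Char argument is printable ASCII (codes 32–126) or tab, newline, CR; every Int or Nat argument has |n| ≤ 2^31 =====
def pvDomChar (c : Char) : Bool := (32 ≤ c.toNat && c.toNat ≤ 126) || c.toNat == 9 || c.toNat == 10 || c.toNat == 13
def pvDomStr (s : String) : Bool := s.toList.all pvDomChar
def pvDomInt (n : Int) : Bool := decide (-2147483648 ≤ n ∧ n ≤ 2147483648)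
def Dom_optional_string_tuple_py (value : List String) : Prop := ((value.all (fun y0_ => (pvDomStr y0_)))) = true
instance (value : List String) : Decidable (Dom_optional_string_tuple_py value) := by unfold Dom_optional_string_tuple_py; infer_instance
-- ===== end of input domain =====

-- ===== PORT A =====
-- B replaces A's incremental pass (result list + running 'seen' set, mid-loop short-circuit)
-- by three bulk phases: strip all, emptiness/empty-string check, whole-list duplicate check.
def optional_nonempty_str_py (value : String) : Option String :=
  let normalized := PySem.Str.strip value
  if normalized = "" then none else some normalized

def ostGo (xs : List String) (seen : PySem.Set String) (acc : List String) : Option (List String) :=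
  match xs with
  | [] => some acc
  | item :: rest =>
    match optional_nonempty_str_py item with
    | none => none
    | some n => if seen.contains n then none else ostGo rest (seen.add n) (acc ++ [n])

def optional_string_tuple_py (value : List String) : Option (List String) :=
  match ostGo value PySem.Set.empty [] with
  | none => none
  | some items => if items = [] then none else some items

-- ===== PORT B =====
def optional_string_tuple_py_alt (value : List String) : Option (List String) :=
  let normalized := value.map (fun x => PySem.Str.strip x)
  if normalized = [] ∨ "" ∈ normalized then none
  else if (PySem.Set.ofList normalized).length ≠ normalized.length then none
  else some normalized

-- ===== PRECONDITION & SPEC =====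
def Spec_optional_string_tuple_py (value : List String) (out : Option (List String)) : Prop := out = optional_string_tuple_py_alt value
instance (value : List String) (out : Option (List String)) : Decidable (Spec_optional_string_tuple_py value out) := by unfold Spec_optional_string_tuple_py; infer_instance

-- ===== CLAIM (what is proved, stated in full; the proofs are below) =====
def Claim_equal_optional_string_tuple_py : Prop := ∀ (value : List String), Dom_optional_string_tuple_py value → Spec_optional_string_tuple_py value (optional_string_tuple_py value)

-- ===== LEMMAS AND PROOFS =====
theorem foldl_add_of_nodup {α : Type} [BEq α] [LawfulBEq α] (xs s : List α)
    (h : (s ++ xs).Nodup) : List.foldl PySem.Set.add s xs = s ++ xs := by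
  induction xs generalizing s with
  | nil => simp
  | cons x rest ih =>
    have hx : x ∉ s := by
      intro hm
      exact (List.disjoint_of_nodup_append h hm) (by simp)
    have : PySem.Set.add s x = s ++ [x] := by
      simp [PySem.Set.add, List.contains_eq_mem, hx]
    rw [List.foldl_cons, this, ih (s ++ [x]) (by simpa using h)]
    simp

theorem foldl_add_length_le {α : Type} [BEq α] (xs s : List α) :
    (List.foldl PySem.Set.add s xs).length ≤ s.length + xs.length := by
  induction xs generalizing s with
  | nil => simp
  | cons x rest ih =>
    rw [List.foldl_cons]
    refine le_trans (ih _) ?_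
    have hlen : (PySem.Set.add s x).length ≤ s.length + 1 := by
      by_cases hc : s.contains x <;> simp [PySem.Set.add, hc]
    simp only [List.length_cons]
    omega

theorem foldl_add_length_lt {α : Type} [BEq α] [LawfulBEq α] (xs s : List α)
    (hs : s.Nodup) (h : ¬ (s ++ xs).Nodup) :
    (List.foldl PySem.Set.add s xs).length < s.length + xs.length := by
  induction xs generalizing s with
  | nil => simp at h; exact absurd hs h
  | cons x rest ih =>
    rw [List.foldl_cons]
    by_cases hx : x ∈ s
    · have : PySem.Set.add s x = s := by
        simp only [PySem.Set.add]
        rw [if_pos (by simpa [List.contains_eq_mem] using hx)]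
      rw [this]
      have := foldl_add_length_le rest s
      simp; omega
    · have hadd : PySem.Set.add s x = s ++ [x] := by
        simp only [PySem.Set.add]
        rw [if_neg (by simpa [List.contains_eq_mem] using hx)]
      rw [hadd]
      have hs' : (s ++ [x]).Nodup :=
        List.Nodup.append hs (List.nodup_singleton _)
          (fun a ha hb => hx ((List.mem_singleton.mp hb) ▸ ha))
      have h' : ¬ ((s ++ [x]) ++ rest).Nodup := by
        simpa [List.append_assoc] using h
      have := ih (s ++ [x]) hs' h'
      simp at this ⊢; omega

theorem ofList_length_eq_iff {α : Type} [BEq α] [LawfulBEq α] (xs : List α) :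
    (PySem.Set.ofList xs).length = xs.length ↔ xs.Nodup := by
  constructor
  · intro h
    by_contra hn
    have := foldl_add_length_lt xs ([] : List α) (by simp) (by simpa using hn)
    simp [PySem.Set.ofList, PySem.Set.empty] at this h
    omega
  · intro h
    have : PySem.Set.ofList xs = xs := by
      simpa [PySem.Set.ofList, PySem.Set.empty] using foldl_add_of_nodup xs [] (by simpa using h)
    rw [this]

theorem ostGo_eq (xs : List String) (seen : PySem.Set String) (acc : List String)
    (hseen : ∀ s, s ∈ seen ↔ s ∈ acc) (hacc : acc.Nodup) :
    ostGo xs seen acc =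
      if "" ∈ xs.map (fun x => PySem.Str.strip x) ∨ ¬ (acc ++ xs.map (fun x => PySem.Str.strip x)).Nodup
      then none else some (acc ++ xs.map (fun x => PySem.Str.strip x)) := by
  induction xs generalizing seen acc with
  | nil => simp [ostGo, hacc]
  | cons x rest ih =>
    by_cases hz : PySem.Str.strip x = ""
    · simp [ostGo, optional_nonempty_str_py, hz]
    · by_cases hmem : PySem.Str.strip x ∈ acc
      · have hms : PySem.Str.strip x ∈ seen := (hseen _).mpr hmem
        have hnod : ¬ (acc ++ PySem.Str.strip x :: List.map (fun x => PySem.Str.strip x) rest).Nodup := by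
          intro hn
          exact (List.disjoint_of_nodup_append hn hmem) (by simp)
        simp [ostGo, optional_nonempty_str_py, hz, hms, hnod]
      · have hc : seen.contains (PySem.Str.strip x) = false := by
          have hns : PySem.Str.strip x ∉ seen := fun h => hmem ((hseen _).mp h)
          simpa [List.contains_eq_mem] using hns
        have hseen' : ∀ s, s ∈ seen.add (PySem.Str.strip x) ↔ s ∈ acc ++ [PySem.Str.strip x] := by
          intro s
          rw [PySem.Set.mem_add]
          simp [hseen]
        have hacc' : (acc ++ [PySem.Str.strip x]).Nodup :=
          List.Nodup.append hacc (List.nodup_singleton _)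
            (fun a ha hb => hmem ((List.mem_singleton.mp hb) ▸ ha))
        simp only [ostGo, optional_nonempty_str_py]
        rw [if_neg hz]
        simp only [hc, if_false, Bool.false_eq_true]
        rw [ih _ _ hseen' hacc']
        simp only [List.map_cons, List.mem_cons, List.append_assoc, List.singleton_append]
        have hne : ¬ ("" = PySem.Str.strip x) := fun h => hz h.symm
        simp [hne]

-- ===== VERDICT (by name: the statement is the Claim_ definition above) =====
theorem optional_string_tuple_py_spec : Claim_equal_optional_string_tuple_py := by
  intro value _
  unfold Spec_optional_string_tuple_py optional_string_tuple_py optional_string_tuple_py_alt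
  rw [ostGo_eq value PySem.Set.empty [] (by simp [PySem.Set.empty]) (by simp)]
  simp only [List.nil_append]
  set m := value.map (fun x => PySem.Str.strip x) with hm
  by_cases h1 : "" ∈ m
  · simp [h1]
  · by_cases h2 : m.Nodup
    · have hlen : (PySem.Set.ofList m).length = m.length := (ofList_length_eq_iff m).mpr h2
      by_cases h3 : m = []
      · simp [h3]
      · simp [h1, h2, h3, hlen]
    · have hlen : (PySem.Set.ofList m).length ≠ m.length := by
        intro h; exact h2 ((ofList_length_eq_iff m).mp h)
      simp [h1, h2, hlen]
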